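-- pv_equiv track=rewrite | github.com/fsanchez334/Graph_practice | strong_ties_vs_weak_ties.py | determine_connection
-- ===== SOURCE A (Python) =====
-- def determine_connection(first_edges, second_edges):
--     if len(first_edges) == 0 or len(second_edges) == 0:
--         return 0
--     else:
--         neighbors_1 = set([pairs[1] for pairs in first_edges])
--         neighbors_2 = set([pairs[1] for pairs in second_edges])
--
--         common_nodes = neighbors_1.intersection(neighbors_2)
--         if len(common_nodes) == 0:
--             return 0
--         else:
--             return 1
-- ===== SOURCE B (Python) =====
-- def determine_connection(first_edges, second_edges):
--     if len(first_edges) == 0 or len(second_edges) == 0: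
--         return 0
--     a = sorted([pairs[1] for pairs in first_edges])
--     b = sorted([pairs[1] for pairs in second_edges])
--     i, j = 0, 0
--     while i < len(a) and j < len(b):
--         if a[i] == b[j]:
--             return 1
--         elif a[i] < b[j]:
--             i += 1
--         else:
--             j += 1
--     return 0
-- ===== Notes on version B (the rewrite author's own statement) =====
-- stated objective: alternative
-- what changed: Replaces hash sets and set.intersection with sorting the two neighbor lists and a two-pointer merge scan that detects a common element without building any set.
import Mathlib
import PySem

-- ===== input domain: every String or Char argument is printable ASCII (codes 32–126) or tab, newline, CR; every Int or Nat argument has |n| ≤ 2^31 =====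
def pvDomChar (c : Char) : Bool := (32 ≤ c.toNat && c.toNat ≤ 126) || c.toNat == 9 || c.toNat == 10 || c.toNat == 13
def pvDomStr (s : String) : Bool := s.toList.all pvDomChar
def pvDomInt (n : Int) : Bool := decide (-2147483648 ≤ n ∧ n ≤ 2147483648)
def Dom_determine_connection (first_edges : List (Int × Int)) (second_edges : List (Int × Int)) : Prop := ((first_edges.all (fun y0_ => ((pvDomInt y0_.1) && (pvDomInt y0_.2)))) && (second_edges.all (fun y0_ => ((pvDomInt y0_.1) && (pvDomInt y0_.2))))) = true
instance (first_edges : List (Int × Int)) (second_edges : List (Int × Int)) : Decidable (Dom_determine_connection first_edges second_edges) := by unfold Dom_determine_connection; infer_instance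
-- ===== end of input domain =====

-- B replaces the hash-set intersection of A by sort + two-pointer merge scan (objective: alternative algorithm).

-- ===== PORT A =====
def determine_connection (first_edges : List (Int × Int)) (second_edges : List (Int × Int)) : Int :=
  if first_edges.length == 0 || second_edges.length == 0 then 0
  else
    let neighbors_1 : PySem.Set Int := PySem.Set.ofList (first_edges.map (fun pairs => pairs.2))
    let neighbors_2 : PySem.Set Int := PySem.Set.ofList (second_edges.map (fun pairs => pairs.2))
    let common_nodes := PySem.Set.inter neighbors_1 neighbors_2
    if PySem.Set.len common_nodes == 0 then 0 else 1

-- ===== PORT B =====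
-- the while loop over indices i, j: each pointer advance drops the head of the corresponding list
def pvTwoPointer : List Int → List Int → Int
  | [], _ => 0
  | _ :: _, [] => 0
  | x :: xs, y :: ys =>
      if x == y then 1
      else if x < y then pvTwoPointer xs (y :: ys)
      else pvTwoPointer (x :: xs) ys
termination_by a b => a.length + b.length

def determine_connection_alt (first_edges : List (Int × Int)) (second_edges : List (Int × Int)) : Int :=
  if first_edges.length == 0 || second_edges.length == 0 then 0
  else
    let a := PySem.List.sorted (first_edges.map (fun pairs => pairs.2)) (fun x => x) false
    let b := PySem.List.sorted (second_edges.map (fun pairs => pairs.2)) (fun x => x) false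
    pvTwoPointer a b

-- ===== PRECONDITION & SPEC =====
def Spec_determine_connection (first_edges : List (Int × Int)) (second_edges : List (Int × Int)) (out : Int) : Prop := out = determine_connection_alt first_edges second_edges
instance (first_edges : List (Int × Int)) (second_edges : List (Int × Int)) (out : Int) : Decidable (Spec_determine_connection first_edges second_edges out) := by unfold Spec_determine_connection; infer_instance

-- ===== CLAIM =====
def Claim_equal_determine_connection : Prop := ∀ (first_edges : List (Int × Int)) (second_edges : List (Int × Int)), Dom_determine_connection first_edges second_edges → Spec_determine_connection first_edges second_edges (determine_connection first_edges second_edges)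

-- ===== LEMMAS AND PROOFS =====
-- On sorted inputs the two-pointer scan decides existence of a common element.
theorem pvTwoPointer_eq (a b : List Int) (ha : a.Pairwise (· ≤ ·)) (hb : b.Pairwise (· ≤ ·)) :
    pvTwoPointer a b = if ∃ x, x ∈ a ∧ x ∈ b then 1 else 0 := by
  induction a generalizing b with
  | nil => simp [pvTwoPointer]
  | cons x xs iha =>
    induction b with
    | nil => simp [pvTwoPointer]
    | cons y ys ihb =>
      rw [List.pairwise_cons] at ha hb
      by_cases hxy : x = y
      · subst hxy
        simp [pvTwoPointer]
      · by_cases hlt : x < y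
        · have hne : (x == y) = false := by simp [hxy]
          have step : pvTwoPointer (x :: xs) (y :: ys) = pvTwoPointer xs (y :: ys) := by
            simp [pvTwoPointer, hne, hlt]
          rw [step, iha (y :: ys) ha.2 (List.pairwise_cons.mpr hb)]
          congr 1
          apply propext
          constructor
          · rintro ⟨z, hz1, hz2⟩; exact ⟨z, List.mem_cons_of_mem _ hz1, hz2⟩
          · rintro ⟨z, hz1, hz2⟩
            rcases List.mem_cons.1 hz1 with rfl | hz1'
            · exfalso
              rcases List.mem_cons.1 hz2 with rfl | hz2'
              · exact hxy rfl
              · have := hb.1 z hz2'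
                omega
            · exact ⟨z, hz1', hz2⟩
        · have hgt : y < x := by omega
          have hne : (x == y) = false := by simp [hxy]
          have step : pvTwoPointer (x :: xs) (y :: ys) = pvTwoPointer (x :: xs) ys := by
            simp [pvTwoPointer, hne, hlt]
          rw [step, ihb hb.2]
          congr 1
          apply propext
          constructor
          · rintro ⟨z, hz1, hz2⟩; exact ⟨z, hz1, List.mem_cons_of_mem _ hz2⟩
          · rintro ⟨z, hz1, hz2⟩
            rcases List.mem_cons.1 hz2 with rfl | hz2'
            · exfalso
              rcases List.mem_cons.1 hz1 with rfl | hz1'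
              · exact hxy rfl
              · have := ha.1 z hz1'
                omega
            · exact ⟨z, hz1, hz2'⟩

theorem inter_nil_iff (l1 l2 : List Int) :
    PySem.Set.inter (PySem.Set.ofList l1) (PySem.Set.ofList l2) = [] ↔
      ¬ ∃ x, x ∈ l1 ∧ x ∈ l2 := by
  rw [List.eq_nil_iff_forall_not_mem]
  constructor
  · rintro h ⟨x, h1, h2⟩
    exact h x (by rw [PySem.Set.mem_inter, PySem.Set.mem_ofList, PySem.Set.mem_ofList]; exact ⟨h1, h2⟩)
  · intro h x hx
    rw [PySem.Set.mem_inter, PySem.Set.mem_ofList, PySem.Set.mem_ofList] at hx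
    exact h ⟨x, hx⟩

-- ===== VERDICT =====
theorem determine_connection_spec : Claim_equal_determine_connection := by
  intro l1 l2 _
  unfold Spec_determine_connection determine_connection determine_connection_alt
  by_cases hg : l1.length == 0 || l2.length == 0
  · simp [hg]
  · simp only [hg, if_false, Bool.false_eq_true]
    rw [pvTwoPointer_eq _ _
      (by simpa using PySem.List.sorted_pairwise (l1.map (fun p => p.2)) (fun x => x))
      (by simpa using PySem.List.sorted_pairwise (l2.map (fun p => p.2)) (fun x => x))]
    by_cases hc : ∃ x, x ∈ l1.map (fun p => p.2) ∧ x ∈ l2.map (fun p => p.2)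
    · have hc' : ∃ x, x ∈ PySem.List.sorted (l1.map (fun p => p.2)) (fun x => x) false ∧
          x ∈ PySem.List.sorted (l2.map (fun p => p.2)) (fun x => x) false := by
        obtain ⟨x, h1, h2⟩ := hc
        exact ⟨x, (PySem.List.mem_sorted _ _ _ _).2 h1, (PySem.List.mem_sorted _ _ _ _).2 h2⟩
      have hne : PySem.Set.inter (PySem.Set.ofList (l1.map (fun pairs => pairs.2)))
          (PySem.Set.ofList (l2.map (fun pairs => pairs.2))) ≠ [] := by
        rw [Ne, inter_nil_iff]; exact fun h => h hc
      have hb : (PySem.Set.len (PySem.Set.inter (PySem.Set.ofList (l1.map (fun pairs => pairs.2)))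
          (PySem.Set.ofList (l2.map (fun pairs => pairs.2)))) == 0) = false := by
        simp [PySem.Set.len, List.length_eq_zero_iff, hne]
      rw [hb, if_neg (by decide : ¬ (false = true)), if_pos hc']
    · have hc' : ¬ ∃ x, x ∈ PySem.List.sorted (l1.map (fun p => p.2)) (fun x => x) false ∧
          x ∈ PySem.List.sorted (l2.map (fun p => p.2)) (fun x => x) false := by
        rintro ⟨x, h1, h2⟩
        exact hc ⟨x, (PySem.List.mem_sorted _ _ _ _).1 h1, (PySem.List.mem_sorted _ _ _ _).1 h2⟩
      have hnil := (inter_nil_iff (l1.map (fun pairs => pairs.2)) (l2.map (fun pairs => pairs.2))).2 hc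
      have hb : (PySem.Set.len (PySem.Set.inter (PySem.Set.ofList (l1.map (fun pairs => pairs.2)))
          (PySem.Set.ofList (l2.map (fun pairs => pairs.2)))) == 0) = true := by
        simp [PySem.Set.len, hnil]
      rw [hb, if_pos rfl, if_neg hc']
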